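-- pv_equiv track=rewrite | github.com/wanglinan0110/PanFlow | examples/design_doc_static_analysis.py | _build_merge_rowspans
-- ===== SOURCE A (Python) =====
-- from typing import Any
--
-- def _build_merge_rowspans(rows: list[dict[str, Any]], merge_key: str | None) -> list[int]:
--     """把相邻且 merge_level 相同的行压成同一组，返回每行对应的 rowspan。"""
--     if merge_key is None:
--         return [1] * len(rows)
--
--     rowspans = [1] * len(rows)
--     row_index = 0
--     while row_index < len(rows):
--         merge_value = rows[row_index].get("merge_level")
--         if merge_value in (None, ""):
--             row_index += 1
--             continue
--
--         group_end = row_index + 1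
--         while group_end < len(rows) and rows[group_end].get("merge_level") == merge_value:
--             group_end += 1
--
--         group_size = group_end - row_index
--         rowspans[row_index] = group_size
--         for hidden_index in range(row_index + 1, group_end):
--             rowspans[hidden_index] = 0
--         row_index = group_end
--
--     return rowspans
-- ===== SOURCE B (Python) =====
-- def _build_merge_rowspans(rows, merge_key):
--     """Single forward pass: accumulate the span on the group head instead of scanning ahead."""
--     if merge_key is None:
--         return [1] * len(rows)
--
--     rowspans = [1] * len(rows)
--     group_start = None
--     group_value = None
--     for i, row in enumerate(rows):
--         v = row.get("merge_level")
--         if v in (None, ""):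
--             group_start = None
--             continue
--         if group_start is not None and v == group_value:
--             rowspans[group_start] += 1
--             rowspans[i] = 0
--         else:
--             group_start = i
--             group_value = v
--     return rowspans
-- ===== Notes on version B (the rewrite author's own statement) =====
-- stated objective: simpler
-- what changed: Replaced the nested look-ahead while loops (scan forward to find the group end, then write the span and zeros for the whole block) by a single forward pass that keeps the current group's head index and value and accumulates the span count on the head as matching rows arrive.
import Mathlib
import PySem

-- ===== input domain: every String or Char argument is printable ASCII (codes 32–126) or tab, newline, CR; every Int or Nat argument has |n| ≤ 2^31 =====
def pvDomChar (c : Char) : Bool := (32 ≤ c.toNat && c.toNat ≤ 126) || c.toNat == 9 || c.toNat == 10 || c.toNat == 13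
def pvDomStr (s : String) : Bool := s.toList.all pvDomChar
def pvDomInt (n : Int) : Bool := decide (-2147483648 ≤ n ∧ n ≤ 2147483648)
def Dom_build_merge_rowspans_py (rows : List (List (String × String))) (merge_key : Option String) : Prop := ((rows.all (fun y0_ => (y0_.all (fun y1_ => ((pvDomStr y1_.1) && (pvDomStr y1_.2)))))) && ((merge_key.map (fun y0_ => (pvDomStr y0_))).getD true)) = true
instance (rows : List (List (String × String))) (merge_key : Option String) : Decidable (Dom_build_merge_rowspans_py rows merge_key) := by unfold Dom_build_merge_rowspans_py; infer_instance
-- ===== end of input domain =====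

-- B replaces A's nested look-ahead scan by a single forward pass that accumulates the
-- span on the group head (objective: simpler; same O(n) cost).

-- ===== PORT A =====
-- row.get("merge_level")
def pvGetML (row : List (String × String)) : Option String :=
  (PySem.Dict.mk row).get? "merge_level"

-- inner `while group_end < len(rows) and rows[group_end].get("merge_level") == merge_value`
def pvAScan (rows : List (List (String × String))) (v : String) (i : Nat) : Nat :=
  if h : i < rows.length then
    if pvGetML rows[i] = some v then pvAScan rows v (i + 1) else i
  else i
termination_by rows.length - i

lemma pvAScan_ge (rows : List (List (String × String))) (v : String) (i : Nat) :
    i ≤ pvAScan rows v i := by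
  unfold pvAScan
  split
  · split
    · exact le_trans (Nat.le_succ i) (pvAScan_ge rows v (i + 1))
    · exact le_refl i
  · exact le_refl i
termination_by rows.length - i

-- `for hidden_index in range(row_index + 1, group_end): rowspans[hidden_index] = 0`
def pvAZero (spans : List Int) (i stop : Nat) : List Int :=
  if i < stop then pvAZero (spans.set i 0) (i + 1) stop else spans
termination_by stop - i

-- outer while loop of A
def pvALoop (rows : List (List (String × String))) (i : Nat) (spans : List Int) : List Int :=
  if h : i < rows.length then
    match pvGetML rows[i] with
    | none => pvALoop rows (i + 1) spans
    | some v =>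
      if v = "" then pvALoop rows (i + 1) spans
      else
        let ge := pvAScan rows v (i + 1)
        pvALoop rows ge (pvAZero (spans.set i ((ge : Int) - (i : Int))) (i + 1) ge)
  else spans
termination_by rows.length - i
decreasing_by
  · omega
  · have := pvAScan_ge rows v (i + 1); omega

def build_merge_rowspans_py (rows : List (List (String × String))) (merge_key : Option String) : List Int :=
  match merge_key with
  | none => List.replicate rows.length 1
  | some _ => pvALoop rows 0 (List.replicate rows.length 1)

-- ===== PORT B =====
-- single forward pass; st = the current group's (head index, value), if any
def pvBLoop (rows : List (List (String × String))) (i : Nat) (spans : List Int)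
    (st : Option (Nat × String)) : List Int :=
  if h : i < rows.length then
    match pvGetML rows[i] with
    | none => pvBLoop rows (i + 1) spans none
    | some v =>
      if v = "" then pvBLoop rows (i + 1) spans none
      else
        match st with
        | some (g, gv) =>
          if v = gv then
            pvBLoop rows (i + 1) (((spans.set g (spans.getD g 0 + 1)).set i 0)) (some (g, gv))
          else pvBLoop rows (i + 1) spans (some (i, v))
        | none => pvBLoop rows (i + 1) spans (some (i, v))
  else spans
termination_by rows.length - i

def build_merge_rowspans_py_alt (rows : List (List (String × String))) (merge_key : Option String) : List Int :=
  match merge_key with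
  | none => List.replicate rows.length 1
  | some _ => pvBLoop rows 0 (List.replicate rows.length 1) none

-- ===== PRECONDITION & SPEC =====
def Spec_build_merge_rowspans_py (rows : List (List (String × String))) (merge_key : Option String) (out : List Int) : Prop := out = build_merge_rowspans_py_alt rows merge_key
instance (rows : List (List (String × String))) (merge_key : Option String) (out : List Int) : Decidable (Spec_build_merge_rowspans_py rows merge_key out) := by unfold Spec_build_merge_rowspans_py; infer_instance

-- ===== CLAIM (what is proved, stated in full; the proofs are below) =====
def Claim_equal_build_merge_rowspans_py : Prop := ∀ (rows : List (List (String × String))) (merge_key : Option String), Dom_build_merge_rowspans_py rows merge_key → Spec_build_merge_rowspans_py rows merge_key (build_merge_rowspans_py rows merge_key)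

-- ===== LEMMAS AND PROOFS =====

lemma pvAScan_stop (rows : List (List (String × String))) (v : String) (i : Nat)
    (h : ∀ h' : i < rows.length, pvGetML rows[i] ≠ some v) :
    pvAScan rows v i = i := by
  unfold pvAScan
  split
  · rename_i h'
    rw [if_neg (h h')]
  · rfl

lemma pvAScan_step (rows : List (List (String × String))) (v : String) (i : Nat)
    (h : i < rows.length) (hm : pvGetML rows[i] = some v) :
    pvAScan rows v i = pvAScan rows v (i + 1) := by
  conv_lhs => unfold pvAScan
  simp [h, hm]

lemma set_getD_self (spans : List Int) (g : Nat) (h : g < spans.length) :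
    spans.set g (spans.getD g 0) = spans := by
  apply List.ext_getElem
  · simp
  · intro n h1 h2
    rcases eq_or_ne n g with rfl | hne
    · simp [List.getD, List.getElem?_eq_getElem h]
    · simp [List.getElem_set_ne (Ne.symm hne)]

lemma pvAZero_cons_zero (spans : List Int) (i stop : Nat) (h : i < stop) :
    pvAZero (spans.set i 0) (i + 1) stop = pvAZero spans i stop := by
  conv_rhs => unfold pvAZero
  simp [h]

lemma pvAZero_stop (spans : List Int) (i : Nat) : pvAZero spans i i = spans := by
  unfold pvAZero
  simp

lemma getD_set_ne (spans : List Int) (j g : Nat) (x : Int) (h : g ≠ j) :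
    (spans.set g x).getD j 0 = spans.getD j 0 := by
  simp [List.getD, List.getElem?_set_ne h]

lemma getD_set_self (spans : List Int) (g : Nat) (x : Int) (h : g < spans.length) :
    (spans.set g x).getD g 0 = x := by
  simp [List.getD, h]

-- base of the induction: past the end, all four programs return the spans unchanged
lemma pvMG_base (rows : List (List (String × String))) (i : Nat) (spans : List Int)
    (hi : ¬ i < rows.length) :
    pvBLoop rows i spans none = pvALoop rows i spans ∧
    ∀ g v base, g < spans.length → spans.getD g 0 = base →
      pvBLoop rows i spans (some (g, v)) =
        pvALoop rows (pvAScan rows v i)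
          (pvAZero (spans.set g (base + ((pvAScan rows v i : Int) - (i : Int)))) i
            (pvAScan rows v i)) := by
  constructor
  · unfold pvBLoop pvALoop; simp [hi]
  · intro g v base hglen hbase
    have hscan : pvAScan rows v i = i := pvAScan_stop rows v i (fun h' => absurd h' hi)
    rw [hscan, pvAZero_stop]
    have : base + ((i : Int) - (i : Int)) = base := by ring
    rw [this, ← hbase, set_getD_self spans g hglen]
    unfold pvBLoop pvALoop
    simp [hi]

lemma pvSetShuffle (spans : List Int) (g i : Nat) (y x : Int) (h : g ≠ i) :
    ((spans.set g y).set i 0).set g x = (spans.set g x).set i 0 := by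
  apply List.ext_getElem
  · simp
  · intro n h1 h2
    by_cases hng : g = n
    · by_cases hni : i = n
      · exact absurd (hng.trans hni.symm) h
      · simp [hng, hni]
    · by_cases hni : i = n
      · simp [hng, hni]
      · simp [hng, hni]

-- Combined invariant: with all in-range spans at positions ≥ i still equal to 1,
-- (M) B's loop with no open group equals A's loop, and
-- (G) B's loop with open group (g, v) equals A's loop resumed at the end of the scan,
--     with the head bumped by the number of matching rows and those rows zeroed.
lemma pvMG (rows : List (List (String × String))) :
    ∀ n i spans, rows.length - i ≤ n → spans.length = rows.length →
      (∀ j, i ≤ j → j < spans.length → spans.getD j 0 = 1) →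
      (pvBLoop rows i spans none = pvALoop rows i spans ∧
       ∀ g v base, v ≠ "" → g < i → g < spans.length → spans.getD g 0 = base →
         pvBLoop rows i spans (some (g, v)) =
           pvALoop rows (pvAScan rows v i)
             (pvAZero (spans.set g (base + ((pvAScan rows v i : Int) - (i : Int)))) i
               (pvAScan rows v i))) := by
  intro n
  induction n with
  | zero =>
    intro i spans hn hlen hinv
    have hi : ¬ i < rows.length := by omega
    exact ⟨(pvMG_base rows i spans hi).1,
      fun g v base _ _ hglen hbase => (pvMG_base rows i spans hi).2 g v base hglen hbase⟩
  | succ n ih =>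
    intro i spans hn hlen hinv
    by_cases hi : i < rows.length
    · have hn' : rows.length - (i + 1) ≤ n := by omega
      have hinv' : ∀ j, i + 1 ≤ j → j < spans.length → spans.getD j 0 = 1 :=
        fun j hj hjl => hinv j (by omega) hjl
      constructor
      · -- M part
        cases hml : pvGetML rows[i] with
        | none =>
          unfold pvBLoop pvALoop
          simp only [hi, dite_true, hml]
          exact (ih (i + 1) spans hn' hlen hinv').1
        | some v =>
          by_cases hv : v = ""
          · unfold pvBLoop pvALoop
            simp only [hi, dite_true, hml, hv]
            exact (ih (i + 1) spans hn' hlen hinv').1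
          · have hG := (ih (i + 1) spans hn' hlen hinv').2 i v (spans.getD i 0) hv
              (by omega) (by omega) rfl
            unfold pvBLoop pvALoop
            simp only [hi, dite_true, hml, if_neg hv]
            rw [hG, hinv i (le_refl i) (by omega)]
            have h1 : (1 : Int) + ((pvAScan rows v (i + 1) : Int) - ((i + 1 : Nat) : Int))
                 = (pvAScan rows v (i + 1) : Int) - (i : Int) := by push_cast; ring
            rw [h1]
      · -- G part
        intro g v base hv hgi hglen hbase
        cases hml : pvGetML rows[i] with
        | none =>
          have hscan : pvAScan rows v i = i := by
            apply pvAScan_stop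
            intro h' he
            rw [hml] at he
            simp at he
          rw [hscan, pvAZero_stop]
          have hb : base + ((i : Int) - (i : Int)) = base := by ring
          rw [hb, ← hbase, set_getD_self spans g hglen]
          conv_lhs => unfold pvBLoop
          conv_rhs => unfold pvALoop
          simp only [hi, dite_true, hml]
          exact (ih (i + 1) spans hn' hlen hinv').1
        | some w =>
          by_cases hvw : w = v
          · -- matching row: head bumped, this row zeroed
            subst hvw
            have hscan : pvAScan rows w i = pvAScan rows w (i + 1) :=
              pvAScan_step rows w i hi hml
            have hge : i + 1 ≤ pvAScan rows w (i + 1) := pvAScan_ge rows w (i + 1)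
            have hgne : g ≠ i := by omega
            have hilen : i < spans.length := by omega
            have hglen2 : g < ((spans.set g (base + 1)).set i 0).length := by simpa using hglen
            have hbase2 : ((spans.set g (base + 1)).set i 0).getD g 0 = base + 1 := by
              rw [getD_set_ne _ g i 0 (Ne.symm hgne), getD_set_self spans g (base + 1) hglen]
            have hinv2 : ∀ j, i + 1 ≤ j → j < ((spans.set g (base + 1)).set i 0).length →
                ((spans.set g (base + 1)).set i 0).getD j 0 = 1 := by
              intro j hj hjl
              rw [getD_set_ne _ j i 0 (by omega), getD_set_ne _ j g (base + 1) (by omega)]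
              exact hinv' j hj (by simpa using hjl)
            have hG := (ih (i + 1) ((spans.set g (base + 1)).set i 0)
              (by omega) (by simpa using hlen) hinv2).2 g w (base + 1) hv (by omega) hglen2 hbase2
            conv_lhs => unfold pvBLoop
            simp only [hi, dite_true, hml, if_neg hv, hbase, if_true]
            rw [hG, hscan]
            congr 1
            have harith : base + 1 + ((pvAScan rows w (i + 1) : Int) - ((i + 1 : Nat) : Int))
                = base + ((pvAScan rows w (i + 1) : Int) - (i : Int)) := by push_cast; ring
            rw [harith]
            rw [pvSetShuffle spans g i (base + 1) _ hgne]
            exact pvAZero_cons_zero _ i _ (by omega)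
          · -- value change (w ≠ v): the open group's scan stops here; a new group starts at i
            have hscan : pvAScan rows v i = i := by
              apply pvAScan_stop
              intro h' he
              rw [hml] at he
              simp at he
              exact hvw he
            rw [hscan, pvAZero_stop]
            have hb : base + ((i : Int) - (i : Int)) = base := by ring
            rw [hb, ← hbase, set_getD_self spans g hglen]
            conv_lhs => unfold pvBLoop
            conv_rhs => unfold pvALoop
            simp only [hi, dite_true, hml]
            by_cases hw : w = ""
            · simp only [hw]
              exact (ih (i + 1) spans hn' hlen hinv').1
            · simp only [if_neg hw, if_neg hvw]
              have hG := (ih (i + 1) spans hn' hlen hinv').2 i w (spans.getD i 0) hw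
                (by omega) (by omega) rfl
              rw [hG, hinv i (le_refl i) (by omega)]
              have h1 : (1 : Int) + ((pvAScan rows w (i + 1) : Int) - ((i + 1 : Nat) : Int))
                   = (pvAScan rows w (i + 1) : Int) - (i : Int) := by push_cast; ring
              rw [h1]
    · exact ⟨(pvMG_base rows i spans hi).1,
        fun g v base _ _ hglen hbase => (pvMG_base rows i spans hi).2 g v base hglen hbase⟩

-- ===== VERDICT (by name: the statement is the Claim_ definition above) =====
theorem build_merge_rowspans_py_spec : Claim_equal_build_merge_rowspans_py := by
  intro rows merge_key _
  unfold Spec_build_merge_rowspans_py build_merge_rowspans_py build_merge_rowspans_py_alt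
  cases merge_key with
  | none => rfl
  | some k =>
    exact ((pvMG rows rows.length 0 (List.replicate rows.length 1) (by omega)
      (by simp) (by intro j _ hjl; simp at hjl; simp [List.getD, hjl])).1).symm
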